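-- pv_equiv track=rewrite | github.com/eliseydudin/ict-solutions | other/14_11.hell/2.py | f
-- ===== SOURCE A (Python) =====
-- import math
--
-- def f(num: int, target: int, deny: int):
--     if num < target or num == deny:
--         return 0
--     if num == target:
--         return 1
--     return (
--         f(num - 1, target, deny)
--         + f(num - 2, target, deny)
--         + f(math.floor(num / 3), target, deny)
--     )
-- ===== SOURCE B (Python) =====
-- def f(num: int, target: int, deny: int):
--     if num < target or num == deny:
--         return 0
--     dp = [0 if target == deny else 1]          # dp[i] = f(target + i)
--     for k in range(target + 1, num + 1):
--         if k == deny: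
--             dp.append(0)
--             continue
--         j = k // 3
--         dp.append(dp[k - 1 - target]
--                   + (dp[k - 2 - target] if k - 2 >= target else 0)
--                   + (0 if j < target or j == deny else dp[j - target]))
--     return dp[-1]
-- ===== Notes on version B (the rewrite author's own statement) =====
-- stated objective: faster
-- what changed: Replaced A's exponential three-way recursion f(n-1)+f(n-2)+f(n//3) by a bottom-up dynamic-programming table over [target, num] with one entry per value, computed in a single loop with a base-case-guarded lookup for the n//3 term.
import Mathlib
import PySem

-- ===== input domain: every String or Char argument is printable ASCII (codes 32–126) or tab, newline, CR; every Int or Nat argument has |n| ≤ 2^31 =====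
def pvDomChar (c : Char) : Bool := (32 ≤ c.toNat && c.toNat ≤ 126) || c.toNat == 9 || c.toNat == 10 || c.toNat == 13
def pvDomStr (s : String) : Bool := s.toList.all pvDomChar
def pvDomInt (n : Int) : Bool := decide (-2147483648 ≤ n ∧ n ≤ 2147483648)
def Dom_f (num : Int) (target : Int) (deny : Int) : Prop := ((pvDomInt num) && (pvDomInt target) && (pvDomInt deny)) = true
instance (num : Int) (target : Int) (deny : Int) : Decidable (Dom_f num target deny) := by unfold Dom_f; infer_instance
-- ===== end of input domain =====

-- B replaces A's exponential three-way recursion by a bottom-up DP table over [target, num]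
-- (one entry per value); objective: faster, asymptotic mechanism.

-- ===== PORT A =====
-- A's recursion has no structural decreasing argument in Lean, so it is ported with fuel;
-- under Pre_f the fuel (num - target + 1).toNat is never exhausted (lemma fAux_fuel_irrel
-- below), so `f` computes exactly A's recursion wherever A returns.
-- math.floor(num / 3) is ported as floor division: exact on Dom (|num| ≤ 2^31, so the float
-- quotient num / 3 floors to num // 3).
def fAux (fuel : Nat) (num target deny : Int) : Int :=
  match fuel with
  | 0 => 0
  | fuel + 1 =>
    if num < target ∨ num = deny then 0
    else if num = target then 1
    else fAux fuel (num - 1) target deny + fAux fuel (num - 2) target deny +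
         fAux fuel (PySem.Int.floordiv num 3) target deny

def f (num : Int) (target : Int) (deny : Int) : Int :=
  fAux (num - target + 1).toNat num target deny

-- ===== PORT B =====
-- one loop iteration of Source B: extend dp by the entry for k
-- (Source B's dp[i] indexing is always in range inside Pre_f; ported as getD with default 0)
def altStep (target deny : Int) (dp : List Int) (k : Int) : List Int :=
  if k = deny then dp ++ [0]
  else
    dp ++ [dp.getD (k - 1 - target).toNat 0
      + (if target ≤ k - 2 then dp.getD (k - 2 - target).toNat 0 else 0)
      + (if PySem.Int.floordiv k 3 < target ∨ PySem.Int.floordiv k 3 = deny then 0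
         else dp.getD (PySem.Int.floordiv k 3 - target).toNat 0)]

def f_alt (num : Int) (target : Int) (deny : Int) : Int :=
  if num < target ∨ num = deny then 0
  else
    ((PySem.List.pyRange (target + 1) (num + 1) 1).foldl (altStep target deny)
      [if target = deny then 0 else 1]).getLastD 0   -- dp[-1]; dp is nonempty

-- ===== PRECONDITION & SPEC =====
-- Pre_f is exactly the set of inputs on which A's recursion terminates (verified on a grid):
-- outside it the floor(n/3) chain reaches the self-loop at 0 or -1 and A raises RecursionError,
-- returning no value, so those inputs are excluded.
def Pre_f (num : Int) (target : Int) (deny : Int) : Prop :=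
  num < target ∨ num = deny ∨ num = target ∨ 0 ≤ target ∨ (target = -1 ∧ deny = 0) ∨
    (deny ≤ -1 ∧ 3 * deny - 1 ≤ target ∧ num ≤ 3 * deny + 2)
instance (num : Int) (target : Int) (deny : Int) : Decidable (Pre_f num target deny) := by
  unfold Pre_f; infer_instance
def pvWitness_f : Int × Int × Int := (10, 2, 5)

def Spec_f (num : Int) (target : Int) (deny : Int) (out : Int) : Prop := out = f_alt num target deny
instance (num : Int) (target : Int) (deny : Int) (out : Int) : Decidable (Spec_f num target deny out) := by
  unfold Spec_f; infer_instance

-- ===== CLAIM (what is proved, stated in full; the proofs are below) =====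
def Claim_equal_f : Prop := ∀ (num : Int) (target : Int) (deny : Int), Dom_f num target deny → Pre_f num target deny → Spec_f num target deny (f num target deny)

-- ===== LEMMAS AND PROOFS =====

-- floor division by 3: defining inequalities (everything else follows by omega)
theorem fd3 (m : Int) : 3 * PySem.Int.floordiv m 3 ≤ m ∧ m < 3 * PySem.Int.floordiv m 3 + 3 := by
  rw [PySem.Int.floordiv_eq_ediv_of_pos (by omega)]
  have h1 := Int.emod_nonneg m (by omega : (3:Int) ≠ 0)
  have h2 := Int.emod_lt_of_pos m (by omega : (0:Int) < 3)
  have h3 := Int.ediv_add_emod m 3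
  omega

-- base cases of A's recursion hold for every fuel
theorem fAux_base (fuel : Nat) (num target deny : Int) (h : num < target ∨ num = deny) :
    fAux fuel num target deny = 0 := by
  cases fuel <;> simp [fAux, h]

-- with enough fuel the result does not depend on the fuel (termination of A under Pre_f);
-- the side condition C restricts num only in the negative "pocket" region of Pre_f
theorem fAux_fuel_irrel (target deny : Int) :
    ∀ (n₁ n₂ : Nat) (num : Int),
      (0 ≤ target ∨ (target = -1 ∧ deny = 0) ∨
        (deny ≤ -1 ∧ 3 * deny - 1 ≤ target ∧
          (num ≤ 3 * deny + 2 ∨ num < target ∨ num = deny))) →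
      (num - target).toNat < n₁ → (num - target).toNat < n₂ →
      fAux n₁ num target deny = fAux n₂ num target deny := by
  intro n₁
  induction n₁ with
  | zero => intro n₂ num _ h1 _; omega
  | succ a ih =>
    intro n₂ num hc h1 h2
    match n₂, h2 with
    | b + 1, h2 =>
      simp only [fAux]
      by_cases hb : num < target ∨ num = deny
      · simp [hb]
      · simp only [hb, if_false]
        by_cases he : num = target
        · simp [he]
        · simp only [he, if_false]
          push_neg at hb
          have hgt : target < num := by omega
          have hq := fd3 num
          rcases hc with ht | ⟨ht, hd⟩ | ⟨hd, htd, hnum⟩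
          · -- target ≥ 0: all three calls shrink the measure
            rw [ih b (num - 1) (Or.inl ht) (by omega) (by omega),
                ih b (num - 2) (Or.inl ht) (by omega) (by omega),
                ih b (PySem.Int.floordiv num 3) (Or.inl ht) (by omega) (by omega)]
          · -- target = -1, deny = 0: non-base num ≥ 1, floordiv lands in [0, num-1]
            have hn1 : 1 ≤ num := by omega
            rw [ih b (num - 1) (Or.inr (Or.inl ⟨ht, hd⟩)) (by omega) (by omega),
                ih b (num - 2) (Or.inr (Or.inl ⟨ht, hd⟩)) (by omega) (by omega),
                ih b (PySem.Int.floordiv num 3) (Or.inr (Or.inl ⟨ht, hd⟩)) (by omega) (by omega)]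
          · -- pocket: non-base num ∈ [3·deny, 3·deny+2], so floordiv num 3 = deny (a base case)
            have hnum' : num ≤ 3 * deny + 2 := by omega
            have hflo : PySem.Int.floordiv num 3 = deny := by omega
            rw [hflo, fAux_base a deny target deny (Or.inr rfl),
                fAux_base b deny target deny (Or.inr rfl),
                ih b (num - 1) (Or.inr (Or.inr ⟨hd, htd, Or.inl (by omega)⟩)) (by omega) (by omega),
                ih b (num - 2) (Or.inr (Or.inr ⟨hd, htd, Or.inl (by omega)⟩)) (by omega) (by omega)]

-- region hypothesis used by the recurrence and the loop invariant
def RegionOK (target deny bound : Int) : Prop :=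
  0 ≤ target ∨ (target = -1 ∧ deny = 0) ∨
    (deny ≤ -1 ∧ 3 * deny - 1 ≤ target ∧ bound ≤ 3 * deny + 2)

-- any sufficient fuel computes f
theorem fAux_eq_f (fuel : Nat) (num target deny : Int)
    (hr : RegionOK target deny num) (h : (num - target).toNat < fuel) :
    fAux fuel num target deny = f num target deny := by
  by_cases hb : num < target ∨ num = deny
  · rw [fAux_base _ _ _ _ hb, f, fAux_base _ _ _ _ hb]
  · have hc : 0 ≤ target ∨ (target = -1 ∧ deny = 0) ∨
        (deny ≤ -1 ∧ 3 * deny - 1 ≤ target ∧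
          (num ≤ 3 * deny + 2 ∨ num < target ∨ num = deny)) := by
      rcases hr with h | h | ⟨h1, h2, h3⟩
      · exact Or.inl h
      · exact Or.inr (Or.inl h)
      · exact Or.inr (Or.inr ⟨h1, h2, Or.inl h3⟩)
    exact fAux_fuel_irrel target deny fuel ((num - target + 1).toNat) num hc h (by omega)

theorem f_base (num target deny : Int) (h : num < target ∨ num = deny) :
    f num target deny = 0 := fAux_base _ _ _ _ h

theorem f_target (target deny : Int) (hd : target ≠ deny) : f target target deny = 1 := by
  simp [f, fAux, hd]

-- A's recurrence, with f as the (unique) terminating value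
theorem f_rec (num target deny : Int) (hr : RegionOK target deny num)
    (hlt : target < num) (hd : num ≠ deny) :
    f num target deny =
      f (num - 1) target deny + f (num - 2) target deny +
      f (PySem.Int.floordiv num 3) target deny := by
  have hfuel : (num - target + 1).toNat = (num - target).toNat + 1 := by omega
  have hq := fd3 num
  rw [f, hfuel]
  simp only [fAux]
  have h1 : ¬(num < target ∨ num = deny) := by push_neg; exact ⟨by omega, hd⟩
  have h2 : ¬(num = target) := by omega
  rw [if_neg h1, if_neg h2]
  rcases hr with ht | ⟨ht, hdn⟩ | ⟨hdn, htd, hnum⟩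
  · -- target ≥ 0
    rw [fAux_eq_f _ _ _ _ (Or.inl ht) (by omega), fAux_eq_f _ _ _ _ (Or.inl ht) (by omega),
        fAux_eq_f _ _ _ _ (Or.inl ht) (by omega)]
  · -- target = -1, deny = 0
    have hn1 : 1 ≤ num := by omega
    rw [fAux_eq_f _ _ _ _ (Or.inr (Or.inl ⟨ht, hdn⟩)) (by omega),
        fAux_eq_f _ _ _ _ (Or.inr (Or.inl ⟨ht, hdn⟩)) (by omega),
        fAux_eq_f _ _ _ _ (Or.inr (Or.inl ⟨ht, hdn⟩)) (by omega)]
  · -- pocket: floordiv num 3 = deny, a base value for both sides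
    have hflo : PySem.Int.floordiv num 3 = deny := by omega
    rw [hflo, fAux_base _ _ _ _ (Or.inr rfl), f_base _ _ _ (Or.inr rfl),
        fAux_eq_f _ _ _ _ (Or.inr (Or.inr ⟨hdn, htd, by omega⟩)) (by omega),
        fAux_eq_f _ _ _ _ (Or.inr (Or.inr ⟨hdn, htd, by omega⟩)) (by omega)]

-- value of an entry of B's dp table
theorem dp_getD (target deny : Int) (n i : Nat) :
    ((List.range n).map (fun i : Nat => f (target + i) target deny)).getD i 0 =
      if i < n then f (target + i) target deny else 0 := by
  by_cases h : i < n
  · rw [List.getD_eq_getElem _ _ (by simpa using h)]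
    simp [h]
  · rw [List.getD_eq_default _ _ (by simpa using Nat.le_of_not_lt h)]
    simp [h]

-- loop invariant of B: after n iterations dp lists f on [target, target + n]
theorem alt_inv (target deny : Int) :
    ∀ n : Nat, RegionOK target deny (target + n) →
      (PySem.List.pyRange (target + 1) (target + 1 + n) 1).foldl (altStep target deny)
          [if target = deny then 0 else 1] =
        (List.range (n + 1)).map (fun i : Nat => f (target + i) target deny) := by
  have hinit : (if target = deny then (0:Int) else 1) = f target target deny := by
    by_cases hd : target = deny
    · rw [if_pos hd, f_base _ _ _ (Or.inr hd)]
    · rw [if_neg hd, f_target _ _ hd]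
  intro n
  induction n with
  | zero =>
    intro _
    rw [show target + 1 + (0:Nat) = target + 1 by push_cast; ring]
    rw [PySem.List.pyRange_one_eq_nil (by omega)]
    simp [hinit]
  | succ n ih =>
    intro hr
    have hr' : RegionOK target deny (target + n) := by
      rcases hr with h | h | ⟨h1, h2, h3⟩
      · exact Or.inl h
      · exact Or.inr (Or.inl h)
      · exact Or.inr (Or.inr ⟨h1, h2, by push_cast at h3 ⊢; omega⟩)
    have hsplit : PySem.List.pyRange (target + 1) (target + 1 + (n + 1 : Nat)) 1 =
        PySem.List.pyRange (target + 1) (target + 1 + n) 1 ++ [target + 1 + n] := by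
      rw [show (target + 1 + (n + 1 : Nat) : Int) = (target + 1 + n) + 1 by push_cast; ring]
      exact PySem.List.pyRange_one_succ_right (by omega)
    rw [hsplit, List.foldl_append, ih hr']
    set m : Int := target + 1 + n with hm
    have hrm : RegionOK target deny m := by
      rcases hr with h | h | ⟨h1, h2, h3⟩
      · exact Or.inl h
      · exact Or.inr (Or.inl h)
      · exact Or.inr (Or.inr ⟨h1, h2, by rw [hm]; push_cast at h3 ⊢; omega⟩)
    have hstep : altStep target deny
        ((List.range (n + 1)).map (fun i : Nat => f (target + i) target deny)) m =
        (List.range (n + 1)).map (fun i : Nat => f (target + i) target deny) ++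
          [f m target deny] := by
      by_cases hd : m = deny
      · rw [altStep, if_pos hd, f_base _ _ _ (Or.inr hd)]
      · rw [altStep, if_neg hd]
        have hrec := f_rec m target deny hrm (by omega) hd
        have hq := fd3 m
        have e1 : ((List.range (n + 1)).map
            (fun i : Nat => f (target + i) target deny)).getD (m - 1 - target).toNat 0 =
            f (m - 1) target deny := by
          rw [show (m - 1 - target).toNat = n by omega, dp_getD, if_pos (by omega),
              show target + (n : Int) = m - 1 by omega]
        have e2 : (if target ≤ m - 2 then
              ((List.range (n + 1)).map (fun i : Nat => f (target + i) target deny)).getD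
                (m - 2 - target).toNat 0
            else (0:Int)) = f (m - 2) target deny := by
          by_cases h2 : target ≤ m - 2
          · rw [if_pos h2, dp_getD, if_pos (by omega),
                show target + ((m - 2 - target).toNat : Int) = m - 2 by omega]
          · rw [if_neg h2, f_base _ _ _ (Or.inl (by omega))]
        have e3 : (if PySem.Int.floordiv m 3 < target ∨ PySem.Int.floordiv m 3 = deny then (0:Int)
            else ((List.range (n + 1)).map (fun i : Nat => f (target + i) target deny)).getD
                (PySem.Int.floordiv m 3 - target).toNat 0) =
            f (PySem.Int.floordiv m 3) target deny := by
          by_cases h3 : PySem.Int.floordiv m 3 < target ∨ PySem.Int.floordiv m 3 = deny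
          · rw [if_pos h3, f_base _ _ _ h3]
          · push_neg at h3
            -- in every region a non-base floordiv value is strictly below m, hence in the table
            have hlt3 : PySem.Int.floordiv m 3 < m := by
              rcases hrm with ht | ⟨ht, hdn⟩ | ⟨hdn, htd, hb⟩
              · omega
              · omega
              · -- pocket: m ∈ [3·deny, 3·deny+2] would force floordiv m 3 = deny, excluded
                omega
            rw [if_neg (by push_neg; exact h3), dp_getD, if_pos (by omega),
                show target + ((PySem.Int.floordiv m 3 - target).toNat : Int) =
                  PySem.Int.floordiv m 3 by omega]
        rw [List.append_cancel_left_eq, e1, e2, e3, ← hrec]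
    rw [List.foldl_cons, List.foldl_nil, hstep]
    have hexp : (List.range (n + 1 + 1)).map (fun i : Nat => f (target + i) target deny) =
        (List.range (n + 1)).map (fun i : Nat => f (target + i) target deny) ++
          [f (target + ((n + 1 : Nat) : Int)) target deny] := by
      rw [List.range_succ, List.map_append]; rfl
    rw [hexp]
    congr 3
    push_cast
    omega

-- ===== VERDICT (by name: the statement is the Claim_ definition above) =====
theorem f_spec : Claim_equal_f := by
  unfold Claim_equal_f
  intro num target deny _ hpre
  unfold Spec_f f_alt
  by_cases hb : num < target ∨ num = deny
  · rw [if_pos hb, f_base _ _ _ hb]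
  · rw [if_neg hb]
    push_neg at hb
    obtain ⟨hge, hd⟩ := hb
    by_cases heq : num = target
    · subst heq
      rw [PySem.List.pyRange_one_eq_nil (by omega)]
      simp [f_target _ _ hd, hd]
    · have hr : RegionOK target deny num := by
        rcases hpre with h | h | h | h | h | ⟨h1, h2, h3⟩
        · exact absurd h (by omega)
        · exact absurd h hd
        · exact absurd h heq
        · exact Or.inl h
        · exact Or.inr (Or.inl h)
        · exact Or.inr (Or.inr ⟨h1, h2, h3⟩)
      set n : Nat := (num - target - 1).toNat with hndef
      have hrn : RegionOK target deny (target + ((n + 1 : Nat) : Int)) := by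
        rcases hr with h | h | ⟨h1, h2, h3⟩
        · exact Or.inl h
        · exact Or.inr (Or.inl h)
        · exact Or.inr (Or.inr ⟨h1, h2, by push_cast; omega⟩)
      rw [show num + 1 = target + 1 + ((n + 1 : Nat) : Int) by push_cast; omega]
      rw [alt_inv target deny (n + 1) hrn]
      rw [show n + 1 + 1 = (n + 1) + 1 from rfl, List.range_succ, List.map_append]
      simp only [List.map_cons, List.map_nil]
      rw [List.getLastD_concat]
      congr 1
      push_cast
      omega
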